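-- pv_equiv track=rewrite | github.com/nagneo/programmers | findNumber/solution.py | convertStringToNum
-- ===== SOURCE A (Python) =====
-- def findall(word, str):
--     i = str.find(word)
--     while i != -1:
--         yield i
--         i = str.find(word,i+1)
--
-- def findNumberMap(str, numbers):
--     findMap = {}
--     for idx, num in enumerate(numbers):
--         indexList = [(i, str[i:i+len(num)]) for i in findall(num, str)]
--         for index in indexList:
--             findMap[index[0]] = idx;
--     return findMap
--
-- def convertStringToNum(strNums, numbers):
--     result = ""
--     if(strNums):
--         map = findNumberMap(strNums, numbers)
--         sortedMap = sorted(map.items())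
--         for n in sortedMap:
--             result += str(n[1])
--
--     return result
-- ===== SOURCE B (Python) =====
-- def convertStringToNum(strNums, numbers):
--     if not strNums:
--         return ""
--     n = len(strNums)
--     pat = {}
--     for idx, num in enumerate(numbers):
--         pat[num] = idx              # later duplicates overwrite: keeps the highest index
--     lengths = sorted(set(map(len, pat)))
--     parts = []
--     for i in range(n + 1):
--         best = -1
--         for L in lengths:
--             if i + L <= n:
--                 j = pat.get(strNums[i:i+L], -1)
--                 if j > best:
--                     best = j
--         if best >= 0:
--             parts.append(str(best))
--     return "".join(parts)
-- ===== Notes on version B (the rewrite author's own statement) =====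
-- stated objective: faster
-- what changed: A runs a find-loop over the whole string for every pattern, records match positions in a position-to-index dict (later patterns overwriting earlier) and then sorts the dict items; B builds a pattern-to-last-index dict once and makes a single left-to-right scan over positions, probing only the distinct pattern lengths by substring hash lookup, so the per-pattern scans and the sort disappear.
import Mathlib
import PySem

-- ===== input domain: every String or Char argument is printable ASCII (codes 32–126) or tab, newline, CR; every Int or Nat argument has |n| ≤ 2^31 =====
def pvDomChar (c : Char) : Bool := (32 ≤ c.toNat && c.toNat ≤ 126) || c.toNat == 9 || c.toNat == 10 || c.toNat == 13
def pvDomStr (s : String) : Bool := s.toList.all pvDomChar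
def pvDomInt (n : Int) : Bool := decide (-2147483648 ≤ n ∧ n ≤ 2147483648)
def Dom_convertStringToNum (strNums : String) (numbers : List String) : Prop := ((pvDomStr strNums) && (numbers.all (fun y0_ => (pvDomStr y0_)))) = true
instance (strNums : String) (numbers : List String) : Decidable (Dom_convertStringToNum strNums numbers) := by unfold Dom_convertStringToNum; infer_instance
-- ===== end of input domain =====

-- B replaces A's per-pattern find-loops + position→index dict + sort by one left-to-right scan over
-- positions with a pattern→last-index hash and the distinct pattern lengths (objective: faster; measured).

-- ===== PORT A =====
-- findall(word, str): repeated str.find; the fuel only makes the while-loop total (it never runs out: ≤ len+2 iterations)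
def pyFindallGo (s word : String) (i : Int) : Nat → List Int
  | 0 => []
  | fuel+1 => if i = -1 then [] else i :: pyFindallGo s word (PySem.Str.findFrom s word (i+1)) fuel

def pyFindall (word s : String) : List Int :=
  pyFindallGo s word (PySem.Str.find s word) (s.toList.length + 2)

def findNumberMap (s : String) (numbers : List String) : PySem.Dict Int Int :=
  (PySem.List.enumerate numbers).foldl (fun findMap p =>
    let indexList : List (Int × String) :=
      (pyFindall p.2 s).map (fun i => (i, PySem.Str.slice s (some i) (some (i + PySem.Str.len p.2))))
    indexList.foldl (fun m idx => m.insert idx.1 p.1) findMap) PySem.Dict.empty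

def convertStringToNum (strNums : String) (numbers : List String) : String :=
  let result := ""
  if strNums ≠ "" then
    let map := findNumberMap strNums numbers
    let sortedMap := PySem.List.sorted2 map.items Prod.fst Prod.snd
    sortedMap.foldl (fun r p => r ++ PySem.Int.toStr p.2) result
  else result

-- ===== PORT B =====
def convertStringToNum_alt (strNums : String) (numbers : List String) : String :=
  if strNums = "" then ""
  else
    let n := PySem.Str.len strNums
    let pat := (PySem.List.enumerate numbers).foldl (fun pat p => pat.insert p.2 p.1)
                 (PySem.Dict.empty : PySem.Dict String Int)
    let lengths := PySem.List.sorted (PySem.Set.ofList (pat.keys.map PySem.Str.len)) (fun x => x)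
    let parts := (PySem.List.pyRange 0 (n+1)).foldl (fun parts i =>
      let best := lengths.foldl (fun best L =>
        if i + L ≤ n then
          let j := pat.getD (PySem.Str.slice strNums (some i) (some (i+L))) (-1)
          if best < j then j else best
        else best) (-1)
      if 0 ≤ best then parts ++ [PySem.Int.toStr best] else parts) ([] : List String)
    PySem.Str.join "" parts

-- ===== PRECONDITION & SPEC =====
def Spec_convertStringToNum (strNums : String) (numbers : List String) (out : String) : Prop := out = convertStringToNum_alt strNums numbers
instance (strNums : String) (numbers : List String) (out : String) : Decidable (Spec_convertStringToNum strNums numbers out) := by unfold Spec_convertStringToNum; infer_instance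

-- ===== CLAIM (what is proved, stated in full; the proofs are below) =====
def Claim_equal_convertStringToNum : Prop := ∀ (strNums : String) (numbers : List String), Dom_convertStringToNum strNums numbers → Spec_convertStringToNum strNums numbers (convertStringToNum strNums numbers)

-- ===== LEMMAS AND PROOFS =====

lemma findFrom_len_succ (L w : List Char) : PySem.Chars.findFrom L w ((L.length : Int)+1) none = -1 := by
  simp only [PySem.Chars.findFrom]
  have h1 : ¬ ((L.length : Int) + 1 < 0) := by omega
  have h2 : (L.length : Int) < (L.length : Int) + 1 := by omega
  simp [h1, h2]

lemma pyFindallGo_eq (w s : String) :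
    ∀ (fuel k : Nat), k ≤ s.toList.length + 1 → s.toList.length + 2 - k ≤ fuel →
    pyFindallGo s w (PySem.Str.findFrom s w (k : Int)) fuel
      = ((List.range' k (s.toList.length + 1 - k)).filter
          (fun i => decide (w.toList <+: s.toList.drop i))).map (Nat.cast : Nat → Int) := by
  intro fuel
  induction fuel with
  | zero => intro k hk hf; omega
  | succ fuel ih =>
    intro k hk hf
    set L := s.toList with hL
    set n := L.length with hn
    rw [PySem.Str.findFrom_eq]
    by_cases hk1 : k = n + 1
    · subst hk1
      have hz : PySem.Chars.findFrom L w.toList ((n + 1 : Nat) : Int) none = -1 := by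
        rw [show ((n + 1 : Nat) : Int) = (n : Int) + 1 by push_cast; ring]
        exact findFrom_len_succ L w.toList
      rw [hz]
      have hnil : pyFindallGo s w (-1 : Int) (fuel+1) = [] := by simp [pyFindallGo]
      rw [hnil]
      simp
    · have hkn : k ≤ n := by omega
      set r := PySem.Chars.findFrom L w.toList (k : Int) none with hrdef
      by_cases hr : r = -1
      · rw [hr]
        have hnil : pyFindallGo s w (-1 : Int) (fuel+1) = [] := by simp [pyFindallGo]
        rw [hnil]
        have hni : ¬ w.toList <:+: L.drop k :=
          (PySem.Chars.findFrom_natCast_eq_neg_one_iff L w.toList k hkn).mp hr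
        have hfilt : (List.range' k (n + 1 - k)).filter
            (fun i => decide (w.toList <+: L.drop i)) = [] := by
          rw [List.filter_eq_nil_iff]
          intro i hi
          simp only [List.mem_range'_1] at hi
          simp only [decide_eq_true_eq]
          intro hpre
          apply hni
          have h1 : w.toList <+: (L.drop k).drop (i - k) := by
            rw [List.drop_drop, show k + (i - k) = i by omega]
            exact hpre
          exact h1.isInfix.trans (List.drop_suffix _ _).isInfix
        rw [hfilt]
        simp
      · obtain ⟨hge, hpre, hmin⟩ := PySem.Chars.findFrom_natCast_spec L w.toList k hkn hr
        have hr0 : 0 ≤ r := le_trans (by positivity) hge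
        set m := r.toNat with hm
        have hrm : r = (m : Int) := (Int.toNat_of_nonneg hr0).symm
        have hkm : k ≤ m := by omega
        have hfind : PySem.Chars.find (L.drop k) w.toList ≠ -1 := by
          intro hf0
          apply hr
          rw [hrdef, PySem.Chars.findFrom_natCast L w.toList k hkn, if_pos hf0]
        have heq : r = (k : Int) + PySem.Chars.find (L.drop k) w.toList := by
          rw [hrdef, PySem.Chars.findFrom_natCast L w.toList k hkn, if_neg hfind]
        have hmn : m ≤ n := by
          have hle := PySem.Chars.find_le_length (L.drop k) w.toList
          rw [List.length_drop] at hle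
          omega
        have hcons : pyFindallGo s w r (fuel+1)
            = r :: pyFindallGo s w (PySem.Str.findFrom s w (r+1)) fuel := by
          simp [pyFindallGo, hr]
        rw [hcons]
        have hstep : r + 1 = ((m + 1 : Nat) : Int) := by omega
        rw [hstep, ih (m+1) (by omega) (by omega)]
        have hsplit : List.range' k (n + 1 - k) = List.range' k (m - k) ++ List.range' m (n + 1 - m) := by
          have h := (List.range'_append (s := k) (m := m-k) (n := n+1-m) (step := 1))
          simp only [Nat.one_mul] at h
          rw [show k + (m - k) = m by omega, show m - k + (n + 1 - m) = n + 1 - k by omega] at h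
          exact h.symm
        rw [hsplit, List.filter_append]
        have hfilt1 : (List.range' k (m - k)).filter (fun i => decide (w.toList <+: L.drop i)) = [] := by
          rw [List.filter_eq_nil_iff]
          intro i hi
          simp only [List.mem_range'_1] at hi
          simp only [decide_eq_true_eq]
          exact hmin i hi.1 (by omega)
        have hrange2 : List.range' m (n + 1 - m) = m :: List.range' (m+1) (n - m) := by
          rw [show n + 1 - m = (n - m) + 1 by omega]
          exact List.range'_succ
        rw [hfilt1, hrange2]
        rw [List.filter_cons_of_pos (by simpa using hpre)]
        rw [show n + 1 - (m + 1) = n - m by omega]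
        simp [hrm]

lemma pyFindall_eq (w s : String) :
    pyFindall w s = ((List.range (s.toList.length + 1)).filter
      (fun i => decide (w.toList <+: s.toList.drop i))).map (Nat.cast : Nat → Int) := by
  unfold pyFindall
  rw [show PySem.Str.find s w = PySem.Str.findFrom s w ((0 : Nat) : Int) by
    rw [PySem.Str.findFrom_eq, PySem.Str.find_eq]
    simpa using (PySem.Chars.findFrom_zero s.toList w.toList).symm]
  rw [pyFindallGo_eq w s (s.toList.length + 2) 0 (by omega) (by omega)]
  rw [List.range_eq_range', Nat.sub_zero]

lemma mem_pyFindall (w s : String) (q : Int) :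
    q ∈ pyFindall w s ↔ (0 ≤ q ∧ q ≤ (s.toList.length : Int) ∧ w.toList <+: s.toList.drop q.toNat) := by
  rw [pyFindall_eq]
  simp only [List.mem_map, List.mem_filter, List.mem_range, decide_eq_true_eq]
  constructor
  · rintro ⟨i, ⟨hi, hp⟩, rfl⟩
    refine ⟨by omega, by omega, by simpa using hp⟩
  · rintro ⟨h0, hn, hp⟩
    exact ⟨q.toNat, ⟨by omega, hp⟩, by omega⟩

lemma get?_foldl_insert_const (ks : List (Int × String)) (v : Int) (d : PySem.Dict Int Int) (q : Int) :
    (ks.foldl (fun m idx => m.insert idx.1 v) d).get? q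
      = if q ∈ ks.map Prod.fst then some v else d.get? q := by
  induction ks generalizing d with
  | nil => simp
  | cons p t ih =>
    simp only [List.foldl_cons, List.map_cons, List.mem_cons]
    rw [ih]
    by_cases hq : q ∈ t.map Prod.fst
    · simp [hq]
    · simp only [hq, if_false, or_false]
      rw [PySem.Dict.get?_insert]

lemma nodup_keys_foldl_insert_pairs (ks : List (Int × String)) (v : Int) (d : PySem.Dict Int Int)
    (h : d.keys.Nodup) : (ks.foldl (fun m idx => m.insert idx.1 v) d).keys.Nodup := by
  induction ks generalizing d with
  | nil => simpa
  | cons p t ih => exact ih _ (PySem.Dict.nodup_keys_insert _ _ _ h)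

def lastMA (L : List Char) (q : Int) : List String → Int → Option Int → Option Int
  | [], _, acc => acc
  | w :: t, s0, acc => lastMA L q t (s0+1)
      (if 0 ≤ q ∧ q ≤ (L.length : Int) ∧ w.toList <+: L.drop q.toNat then some s0 else acc)

lemma lastMA_acc (L : List Char) (q : Int) (ws : List String) :
    ∀ (s0 : Int) (acc : Option Int),
    lastMA L q ws s0 acc = match lastMA L q ws s0 none with
      | some v => some v
      | none => acc := by
  induction ws with
  | nil => intro s0 acc; simp [lastMA]
  | cons w t ih =>
    intro s0 acc
    simp only [lastMA]
    by_cases hc : 0 ≤ q ∧ q ≤ (L.length : Int) ∧ w.toList <+: L.drop q.toNat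
    · simp only [if_pos hc]
      rw [ih (s0+1) (some s0)]
      cases lastMA L q t (s0+1) none <;> rfl
    · simp only [if_neg hc]
      exact ih (s0+1) acc

lemma get?_findNumberMap_aux (s : String) (q : Int) (ws : List String) :
    ∀ (s0 : Int) (d : PySem.Dict Int Int),
    ((PySem.List.enumerate ws s0).foldl (fun findMap p =>
      (((pyFindall p.2 s).map (fun i => (i, PySem.Str.slice s (some i) (some (i + PySem.Str.len p.2))))).foldl
        (fun m idx => m.insert idx.1 p.1) findMap)) d).get? q
      = match lastMA s.toList q ws s0 none with
        | some v => some v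
        | none => d.get? q := by
  induction ws with
  | nil => intro s0 d; simp [PySem.List.enumerate, lastMA]
  | cons w t ih =>
    intro s0 d
    simp only [PySem.List.enumerate, List.foldl_cons]
    rw [ih (s0+1)]
    rw [get?_foldl_insert_const]
    have hm : (q ∈ ((pyFindall w s).map
        (fun i => (i, PySem.Str.slice s (some i) (some (i + PySem.Str.len w))))).map Prod.fst)
        ↔ (0 ≤ q ∧ q ≤ (s.toList.length : Int) ∧ w.toList <+: s.toList.drop q.toNat) := by
      rw [List.map_map, show (Prod.fst ∘ (fun i : Int => (i, PySem.Str.slice s (some i) (some (i + PySem.Str.len w))))) = id from rfl, List.map_id]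
      exact mem_pyFindall w s q
    rw [lastMA_acc s.toList q t (s0+1)]
    by_cases hc : 0 ≤ q ∧ q ≤ (s.toList.length : Int) ∧ w.toList <+: s.toList.drop q.toNat
    · rw [if_pos (hm.mpr hc)]
      rw [show lastMA s.toList q (w :: t) s0 none = lastMA s.toList q t (s0+1) (some s0) from by
        simp only [lastMA, if_pos hc]]
      rw [lastMA_acc s.toList q t (s0+1) (some s0)]
      cases lastMA s.toList q t (s0+1) none <;> rfl
    · rw [if_neg (fun h => hc (hm.mp h))]
      rw [show lastMA s.toList q (w :: t) s0 none = lastMA s.toList q t (s0+1) none from by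
        simp only [lastMA, if_neg hc]]
      rw [lastMA_acc s.toList q t (s0+1) none]
      cases lastMA s.toList q t (s0+1) none <;> rfl

lemma get?_findNumberMap (s : String) (numbers : List String) (q : Int) :
    (findNumberMap s numbers).get? q = lastMA s.toList q numbers 0 none := by
  unfold findNumberMap
  rw [get?_findNumberMap_aux s q numbers 0 PySem.Dict.empty]
  cases lastMA s.toList q numbers 0 none
  · simp [PySem.Dict.get?_empty]
  · rfl

lemma nodup_keys_findNumberMap (s : String) (numbers : List String) :
    (findNumberMap s numbers).keys.Nodup := by
  unfold findNumberMap
  generalize (PySem.List.enumerate numbers : List (Int × String)) = es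
  have h : (PySem.Dict.empty : PySem.Dict Int Int).keys.Nodup := by
    simp [PySem.Dict.keys_empty]
  generalize (PySem.Dict.empty : PySem.Dict Int Int) = d at h ⊢
  induction es generalizing d with
  | nil => simpa
  | cons p t ih =>
    simp only [List.foldl_cons]
    exact ih _ (nodup_keys_foldl_insert_pairs _ _ _ h)

def bestA (L : List Char) (i : Nat) : List String → Int → Int → Int
  | [], _, b => b
  | w :: t, s0, b => bestA L i t (s0+1) (if w.toList <+: L.drop i then s0 else b)

def bestAt (L : List Char) (numbers : List String) (i : Nat) : Int := bestA L i numbers 0 (-1)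

lemma lastMA_bestA (L : List Char) (i : Nat) (hi : i ≤ L.length) (ws : List String) :
    ∀ (s0 : Int), 0 ≤ s0 → ∀ (acc : Option Int) (b : Int),
      ((acc = none ∧ b = -1) ∨ (acc = some b ∧ 0 ≤ b)) →
      ((lastMA L (i : Int) ws s0 acc = none ∧ bestA L i ws s0 b = -1)
        ∨ (lastMA L (i : Int) ws s0 acc = some (bestA L i ws s0 b) ∧ 0 ≤ bestA L i ws s0 b)) := by
  induction ws with
  | nil =>
    intro s0 hs0 acc b hcorr
    simp only [lastMA, bestA]
    rcases hcorr with ⟨h1, h2⟩ | ⟨h1, h2⟩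
    · exact Or.inl ⟨h1, h2⟩
    · exact Or.inr ⟨h1, h2⟩
  | cons w t ih =>
    intro s0 hs0 acc b hcorr
    simp only [lastMA, bestA]
    have hcond : (0 ≤ (i : Int) ∧ (i : Int) ≤ (L.length : Int) ∧ w.toList <+: L.drop ((i : Int)).toNat)
        ↔ (w.toList <+: L.drop i) := by
      constructor
      · rintro ⟨-, -, h⟩; simpa using h
      · intro h; exact ⟨by omega, by omega, by simpa using h⟩
    by_cases hc : w.toList <+: L.drop i
    · rw [if_pos (hcond.mpr hc), if_pos hc]
      exact ih (s0+1) (by omega) (some s0) s0 (Or.inr ⟨rfl, hs0⟩)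
    · rw [if_neg (fun h => hc (hcond.mp h)), if_neg hc]
      exact ih (s0+1) (by omega) acc b hcorr

lemma lastMA_out (L : List Char) (q : Int) (hq : ¬ (0 ≤ q ∧ q ≤ (L.length : Int))) (ws : List String) :
    ∀ (s0 : Int) (acc : Option Int), lastMA L q ws s0 acc = acc := by
  induction ws with
  | nil => intro s0 acc; rfl
  | cons w t ih =>
    intro s0 acc
    simp only [lastMA]
    rw [if_neg (fun h => hq ⟨h.1, h.2.1⟩)]
    exact ih (s0+1) acc

def tgt (L : List Char) (numbers : List String) : List (Int × Int) :=
  (List.range (L.length+1)).filterMap (fun i =>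
    if 0 ≤ bestAt L numbers i then some ((i : Int), bestAt L numbers i) else none)

lemma get?_eq_some_iff_tgt (s : String) (numbers : List String) (p : Int × Int) :
    (findNumberMap s numbers).get? p.1 = some p.2 ↔ p ∈ tgt s.toList numbers := by
  rw [get?_findNumberMap]
  unfold tgt
  rw [List.mem_filterMap]
  constructor
  · intro h
    have hin : 0 ≤ p.1 ∧ p.1 ≤ (s.toList.length : Int) := by
      by_contra hq
      rw [lastMA_out s.toList p.1 hq numbers 0 none] at h
      simp at h
    set i := p.1.toNat with hidef
    have hi : i ≤ s.toList.length := by omega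
    have hcast : ((i : Nat) : Int) = p.1 := by omega
    refine ⟨i, by rw [List.mem_range]; omega, ?_⟩
    rcases lastMA_bestA s.toList i hi numbers 0 (by omega) none (-1) (Or.inl ⟨rfl, rfl⟩) with
      ⟨h1, h2⟩ | ⟨h1, h2⟩
    · rw [hcast] at h1; rw [h1] at h; simp at h
    · rw [hcast] at h1; rw [h1] at h
      have hp2 : p.2 = bestAt s.toList numbers i := (Option.some.inj h).symm
      have hbb : bestAt s.toList numbers i = bestA s.toList i numbers 0 (-1) := rfl
      rw [if_pos (by rw [hbb]; omega)]
      rw [← hp2, hcast]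
  · rintro ⟨i, hmem, hsome⟩
    rw [List.mem_range] at hmem
    by_cases hb : 0 ≤ bestAt s.toList numbers i
    · rw [if_pos hb] at hsome
      obtain rfl := Option.some.inj hsome
      rcases lastMA_bestA s.toList i (by omega) numbers 0 (by omega) none (-1) (Or.inl ⟨rfl, rfl⟩) with
        ⟨h1, h2⟩ | ⟨h1, h2⟩
      · have hbb : bestAt s.toList numbers i = bestA s.toList i numbers 0 (-1) := rfl
        rw [hbb] at hb; omega
      · exact h1
    · rw [if_neg hb] at hsome; simp at hsome

lemma nodup_tgt (L : List Char) (numbers : List String) : (tgt L numbers).Nodup := by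
  unfold tgt
  apply List.Nodup.filterMap
  · intro a a' b hb hb'
    rw [Option.mem_def] at hb hb'
    split_ifs at hb hb' with h1 h2
    obtain rfl := Option.some.inj hb
    have h := congrArg Prod.fst (Option.some.inj hb')
    simp only at h
    omega
  · exact List.nodup_range
lemma nodup_items_findNumberMap (s : String) (numbers : List String) :
    (findNumberMap s numbers).items.Nodup := by
  rw [PySem.Dict.items_eq_map_keys _ (nodup_keys_findNumberMap s numbers) 0]
  exact List.Nodup.map (fun a b h => congrArg Prod.fst h) (nodup_keys_findNumberMap s numbers)
lemma mem_items_iff_tgt (s : String) (numbers : List String) (p : Int × Int) :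
    p ∈ (findNumberMap s numbers).items ↔ p ∈ tgt s.toList numbers := by
  rw [← PySem.Dict.get?_eq_some_iff_mem_items _ _ _ (nodup_keys_findNumberMap s numbers)]
  exact get?_eq_some_iff_tgt s numbers p
lemma items_perm_tgt (s : String) (numbers : List String) :
    (findNumberMap s numbers).items.Perm (tgt s.toList numbers) := by
  rw [List.perm_ext_iff_of_nodup (nodup_items_findNumberMap s numbers) (nodup_tgt _ _)]
  exact mem_items_iff_tgt s numbers
lemma pairwise_fst_tgt (L : List Char) (numbers : List String) :
    (tgt L numbers).Pairwise (fun a b => a.1 < b.1) := by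
  unfold tgt
  rw [List.pairwise_filterMap]
  apply List.Pairwise.imp ?_ (List.pairwise_lt_range)
  intro a a' hlt b hb b' hb'
  split_ifs at hb hb'
  obtain rfl := Option.some.inj hb
  obtain rfl := Option.some.inj hb'
  simpa using hlt
-- congruence for insertion sort comparators
lemma insertBy_congr {α : Type} (P : α → Prop) (f g : α → α → Bool) (x : α) (ys : List α)
    (hfg : ∀ a b, P a → P b → f a b = g a b) (hx : P x) (hys : ∀ y ∈ ys, P y) :
    PySem.List.insertBy f x ys = PySem.List.insertBy g x ys := by
  induction ys with
  | nil => rfl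
  | cons y t ih =>
    by_cases h : g x y = true
    · rw [show PySem.List.insertBy f x (y :: t) = x :: y :: t by
        simp [PySem.List.insertBy, hfg x y hx (hys y (by simp)), h]]
      rw [show PySem.List.insertBy g x (y :: t) = x :: y :: t by
        simp [PySem.List.insertBy, h]]
    · rw [show PySem.List.insertBy f x (y :: t) = y :: PySem.List.insertBy f x t by
        simp [PySem.List.insertBy, hfg x y hx (hys y (by simp)), h]]
      rw [show PySem.List.insertBy g x (y :: t) = y :: PySem.List.insertBy g x t by
        simp [PySem.List.insertBy, h]]
      rw [ih (fun z hz => hys z (by simp [hz]))]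
lemma foldl_insertBy_congr {α : Type} (P : α → Prop) (f g : α → α → Bool)
    (hfg : ∀ a b, P a → P b → f a b = g a b) (xs : List α) (hxs : ∀ x ∈ xs, P x)
    (acc : List α) (hacc : ∀ y ∈ acc, P y) :
    xs.foldl (fun acc x => PySem.List.insertBy f x acc) acc
      = xs.foldl (fun acc x => PySem.List.insertBy g x acc) acc := by
  induction xs generalizing acc with
  | nil => rfl
  | cons x t ih =>
    simp only [List.foldl_cons]
    rw [insertBy_congr P f g x acc hfg (hxs x (by simp)) hacc]
    apply ih (fun z hz => hxs z (by simp [hz]))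
    intro y hy
    rcases (PySem.List.mem_insertBy g x y acc).mp hy with rfl | hy'
    · exact hxs y (by simp)
    · exact hacc y hy'
lemma sorted2_items_eq_tgt (s : String) (numbers : List String) :
    PySem.List.sorted2 (findNumberMap s numbers).items Prod.fst Prod.snd = tgt s.toList numbers := by
  set items := (findNumberMap s numbers).items with hitems
  have hfstinj : ∀ a b : Int × Int, a ∈ items → b ∈ items → a.1 = b.1 → a = b := by
    intro a b ha hb hab
    have ha' := (PySem.Dict.get?_eq_some_iff_mem_items _ a.1 a.2 (nodup_keys_findNumberMap s numbers)).mpr (by simpa using ha)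
    have hb' := (PySem.Dict.get?_eq_some_iff_mem_items _ b.1 b.2 (nodup_keys_findNumberMap s numbers)).mpr (by simpa using hb)
    rw [← hab] at hb'
    rw [ha'] at hb'
    exact Prod.ext hab (Option.some.inj hb')
  have hcongr : PySem.List.sorted2 items Prod.fst Prod.snd = PySem.List.sorted items Prod.fst := by
    show items.foldl (fun acc x => PySem.List.insertBy _ x acc) []
        = items.foldl (fun acc x => PySem.List.insertBy _ x acc) []
    apply foldl_insertBy_congr (fun p => p ∈ items)
    · intro a b ha hb
      by_cases h1 : a.1 < b.1
      · simp [h1]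
      · by_cases h2 : b.1 < a.1
        · simp [h1, h2]
        · have : a.1 = b.1 := by omega
          have hab := hfstinj a b ha hb this
          subst hab
          simp
    · intro x hx; exact hx
    · intro y hy; simp at hy
  rw [hcongr]
  exact PySem.List.sorted_eq_of_perm_of_pairwise_lt items (tgt s.toList numbers) Prod.fst
    (items_perm_tgt s numbers).symm (pairwise_fst_tgt s.toList numbers)

lemma foldl_append_if' (p : Nat → Prop) [DecidablePred p] (f : Nat → String) (l : List Nat) :
    ∀ (acc : List String),
    l.foldl (fun acc x => if p x then acc ++ [f x] else acc) acc
      = acc ++ (l.filter (fun x => decide (p x))).map f := by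
  induction l with
  | nil => intro acc; simp
  | cons x t ih =>
    intro acc
    simp only [List.foldl_cons, List.filter_cons]
    by_cases h : p x
    · rw [if_pos h, ih, if_pos (by simpa using h)]
      simp
    · rw [if_neg h, ih, if_neg (by simpa using h)]

lemma tgt_map_toStr (L : List Char) (numbers : List String) :
    (tgt L numbers).map (fun p => PySem.Int.toStr p.2)
      = ((List.range (L.length+1)).filter
          (fun i => decide (0 ≤ bestAt L numbers i))).map (fun i => PySem.Int.toStr (bestAt L numbers i)) := by
  unfold tgt
  generalize (List.range (L.length+1)) = l
  induction l with
  | nil => rfl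
  | cons x t ih =>
    simp only [List.filterMap_cons, List.filter_cons]
    by_cases h : 0 ≤ bestAt L numbers x
    · rw [if_pos h, if_pos (by simpa using h)]
      simp only [List.map_cons, ih]
    · rw [if_neg h, if_neg (by simpa using h)]
      exact ih

lemma toList_A_fold (l : List (Int × Int)) :
    ∀ (r : String),
    (l.foldl (fun r p => r ++ PySem.Int.toStr p.2) r).toList
      = r.toList ++ (l.map (fun p => (PySem.Int.toStr p.2).toList)).flatten := by
  induction l with
  | nil => intro r; simp
  | cons p t ih =>
    intro r
    simp only [List.foldl_cons, List.map_cons, List.flatten_cons]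
    rw [ih, String.toList_append, List.append_assoc]

lemma join_nil_flatten (parts : List String) :
    (PySem.Str.join "" parts).toList = (parts.map String.toList).flatten := by
  rw [PySem.Str.toList_join]
  have : ("" : String).toList = [] := rfl
  rw [this]
  induction parts with
  | nil => simp [PySem.Chars.join_nil]
  | cons p t ih =>
    cases t with
    | nil => simp [PySem.Chars.join_singleton]
    | cons q r =>
      rw [List.map_cons, List.map_cons, PySem.Chars.join_cons_cons]
      rw [List.map_cons] at ih
      rw [ih]
      simp

-- ===== B-side: the length/dict scan computes bestAt =====

def patDict (numbers : List String) : PySem.Dict String Int :=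
  (PySem.List.enumerate numbers).foldl (fun pat p => pat.insert p.2 p.1) PySem.Dict.empty

-- generic facts about folds of shape 'if P x then max acc (v x) else acc'
lemma foldl_ifmax_base {α : Type} (P : α → Bool) (v : α → Int) (l : List α) :
    ∀ b : Int, b ≤ l.foldl (fun acc x => if P x then max acc (v x) else acc) b := by
  induction l with
  | nil => intro b; simp
  | cons x t ih =>
    intro b
    simp only [List.foldl_cons]
    by_cases h : P x = true
    · rw [if_pos h]; exact le_trans (le_max_left _ _) (ih _)
    · rw [if_neg h]; exact ih b

lemma foldl_ifmax_le {α : Type} (P : α → Bool) (v : α → Int) (l : List α) (c : Int) :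
    ∀ b : Int, b ≤ c → (∀ x ∈ l, P x = true → v x ≤ c) →
    l.foldl (fun acc x => if P x then max acc (v x) else acc) b ≤ c := by
  induction l with
  | nil => intro b hb _; simpa
  | cons x t ih =>
    intro b hb hl
    simp only [List.foldl_cons]
    by_cases h : P x = true
    · rw [if_pos h]
      exact ih _ (max_le hb (hl x (by simp) h)) (fun y hy hp => hl y (by simp [hy]) hp)
    · rw [if_neg h]
      exact ih b hb (fun y hy hp => hl y (by simp [hy]) hp)

lemma foldl_ifmax_mem {α : Type} (P : α → Bool) (v : α → Int) (l : List α) (x : α) :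
    x ∈ l → P x = true → ∀ b : Int, v x ≤ l.foldl (fun acc y => if P y then max acc (v y) else acc) b := by
  induction l with
  | nil => intro h; simp at h
  | cons y t ih =>
    intro hx hp b
    simp only [List.foldl_cons]
    rcases List.mem_cons.mp hx with rfl | hx'
    · rw [if_pos hp]
      exact le_trans (le_max_right _ _) (foldl_ifmax_base P v t _)
    · by_cases h : P y = true
      · rw [if_pos h]; exact ih hx' hp _
      · rw [if_neg h]; exact ih hx' hp b

-- an overwrite fold over ascending enumerate indices equals the max fold
lemma foldl_overwrite_eq_ifmax (P : String → Bool) (ws : List String) :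
    ∀ (s0 b : Int), b ≤ s0 →
    (PySem.List.enumerate ws s0).foldl (fun acc p => if P p.2 then p.1 else acc) b
      = (PySem.List.enumerate ws s0).foldl (fun acc p => if P p.2 then max acc p.1 else acc) b := by
  induction ws with
  | nil => intro s0 b _; simp [PySem.List.enumerate]
  | cons w t ih =>
    intro s0 b hb
    simp only [PySem.List.enumerate, List.foldl_cons]
    by_cases h : P w = true
    · rw [if_pos h, if_pos h, show max b s0 = s0 from by omega]
      exact ih (s0+1) s0 (by omega)
    · rw [if_neg h, if_neg h]
      exact ih (s0+1) b (by omega)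

lemma bestA_eq_enumfold (L : List Char) (i : Nat) (ws : List String) :
    ∀ (s0 b : Int),
    bestA L i ws s0 b = (PySem.List.enumerate ws s0).foldl
      (fun acc p => if decide (p.2.toList <+: L.drop i) then p.1 else acc) b := by
  induction ws with
  | nil => intro s0 b; simp [bestA, PySem.List.enumerate]
  | cons w t ih =>
    intro s0 b
    simp only [bestA, PySem.List.enumerate, List.foldl_cons]
    by_cases h : w.toList <+: L.drop i
    · rw [if_pos h, if_pos (by simpa using h), ih]
    · rw [if_neg h, if_neg (by simpa using h), ih]

lemma bestAt_eq_ifmax (s : String) (numbers : List String) (k : Nat) :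
    bestAt s.toList numbers k = (PySem.List.enumerate numbers).foldl
      (fun acc p => if decide (p.2.toList <+: s.toList.drop k) then max acc p.1 else acc) (-1) := by
  rw [bestAt, bestA_eq_enumfold]
  exact foldl_overwrite_eq_ifmax (fun x => decide (x.toList <+: s.toList.drop k)) numbers 0 (-1) (by omega)

lemma getD_patDict_fold (w : String) (ws : List String) :
    ∀ (s0 : Int) (d : PySem.Dict String Int),
    ((PySem.List.enumerate ws s0).foldl (fun pat p => pat.insert p.2 p.1) d).getD w (-1)
      = (PySem.List.enumerate ws s0).foldl (fun acc p => if decide (p.2 = w) then p.1 else acc)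
          (d.getD w (-1)) := by
  induction ws with
  | nil => intro s0 d; simp [PySem.List.enumerate]
  | cons x t ih =>
    intro s0 d
    simp only [PySem.List.enumerate, List.foldl_cons]
    rw [ih]
    congr 1
    rw [PySem.Dict.getD_insert]
    by_cases h : w = x
    · rw [if_pos h, if_pos (by simp [h])]
    · rw [if_neg h, if_neg (by simp only [decide_eq_true_eq]; exact fun hh => h hh.symm)]

lemma getD_patDict_eq_ifmax (numbers : List String) (w : String) :
    (patDict numbers).getD w (-1) = (PySem.List.enumerate numbers).foldl
      (fun acc p => if decide (p.2 = w) then max acc p.1 else acc) (-1) := by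
  unfold patDict
  rw [getD_patDict_fold, PySem.Dict.getD_empty]
  exact foldl_overwrite_eq_ifmax (fun x => decide (x = w)) numbers 0 (-1) (by omega)

lemma fst_nonneg_of_mem_enumerate (numbers : List String) (p : Int × String)
    (hp : p ∈ PySem.List.enumerate numbers) : 0 ≤ p.1 ∧ p.2 ∈ numbers := by
  rw [PySem.List.mem_enumerate_iff] at hp
  obtain ⟨k, hk, rfl⟩ := hp
  exact ⟨by omega, by simp⟩

-- every string of `numbers` is a key of patDict, so its length is in the scanned length list
lemma len_mem_lengths (numbers : List String) (p : Int × String)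
    (hp : p ∈ PySem.List.enumerate numbers) :
    PySem.Str.len p.2 ∈ PySem.List.sorted (PySem.Set.ofList ((patDict numbers).keys.map PySem.Str.len)) (fun x => x) := by
  rw [PySem.List.mem_sorted, PySem.Set.mem_ofList, List.mem_map]
  refine ⟨p.2, ?_, rfl⟩
  have hge : p.1 ≤ (patDict numbers).getD p.2 (-1) := by
    rw [getD_patDict_eq_ifmax]
    exact foldl_ifmax_mem _ Prod.fst _ p hp (by simp) (-1)
  have h0 : 0 ≤ p.1 := (fst_nonneg_of_mem_enumerate numbers p hp).1
  by_contra hnk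
  have : (patDict numbers).get? p.2 = none :=
    (PySem.Dict.get?_eq_none_iff_not_mem_keys _ _).mpr hnk
  rw [PySem.Dict.getD_eq_get?_getD, this] at hge
  simp at hge
  omega

-- the inner scan over distinct pattern lengths computes bestAt, for positions k ≤ n
lemma Bbest_eq_bestAt (s : String) (numbers : List String) (k : Nat) (hk : k ≤ s.toList.length) :
    (PySem.List.sorted (PySem.Set.ofList ((patDict numbers).keys.map PySem.Str.len)) (fun x => x)).foldl
      (fun best L =>
        if ((k : Nat) : Int) + L ≤ ((s.toList.length : Nat) : Int) then
          let j := (patDict numbers).getD (PySem.Str.slice s (some ((k : Nat) : Int)) (some (((k : Nat) : Int) + L))) (-1)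
          if best < j then j else best
        else best) (-1)
      = bestAt s.toList numbers k := by
  set n := s.toList.length with hn
  set lengths := PySem.List.sorted (PySem.Set.ofList ((patDict numbers).keys.map PySem.Str.len)) (fun x => x) with hlengths
  set E := PySem.List.enumerate numbers 0 with hE
  have hstep : (fun (best L : Int) =>
        if ((k : Nat) : Int) + L ≤ ((n : Nat) : Int) then
          let j := (patDict numbers).getD (PySem.Str.slice s (some ((k : Nat) : Int)) (some (((k : Nat) : Int) + L))) (-1)
          if best < j then j else best
        else best)
      = (fun best L => if decide (((k : Nat) : Int) + L ≤ ((n : Nat) : Int)) then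
          max best ((patDict numbers).getD (PySem.Str.slice s (some ((k : Nat) : Int)) (some (((k : Nat) : Int) + L))) (-1)) else best) := by
    funext best L
    generalize (patDict numbers).getD (PySem.Str.slice s (some ((k : Nat) : Int)) (some (((k : Nat) : Int) + L))) (-1) = j0
    by_cases hf : ((k : Nat) : Int) + L ≤ ((n : Nat) : Int)
    · simp only [decide_eq_true_eq, if_pos hf]
      split_ifs <;> omega
    · simp only [decide_eq_true_eq, if_neg hf]
  rw [hstep, bestAt_eq_ifmax]
  have hlen_nonneg : ∀ L ∈ lengths, 0 ≤ L := by
    intro L hL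
    rw [hlengths, PySem.List.mem_sorted, PySem.Set.mem_ofList, List.mem_map] at hL
    obtain ⟨key, -, rfl⟩ := hL
    rw [PySem.Str.len_eq]
    positivity
  have hslice : ∀ (L : Int), 0 ≤ L →
      (PySem.Str.slice s (some ((k : Nat) : Int)) (some (((k : Nat) : Int) + L))).toList
        = (s.toList.drop k).take L.toNat := by
    intro L hL
    rw [show (((k : Nat) : Int) + L) = ((k : Nat) : Int) + ((L.toNat : Nat) : Int) by omega]
    rw [PySem.Str.slice]
    have h2 : PySem.Chars.slice s.toList (some ((k : Nat) : Int)) (some (((k : Nat) : Int) + ((L.toNat : Nat) : Int)))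
        = (s.toList.drop k).take L.toNat := by
      simpa [PySem.Chars.slice] using PySem.List.slice_natCast_add s.toList k L.toNat
    rw [h2]
    simp
  apply le_antisymm
  · apply foldl_ifmax_le
    · exact foldl_ifmax_base _ _ _ _
    · intro L hL hfit
      rw [decide_eq_true_eq] at hfit
      have hL0 := hlen_nonneg L hL
      rw [getD_patDict_eq_ifmax]
      apply foldl_ifmax_le
      · exact foldl_ifmax_base _ _ _ _
      · intro p hp hpw
        rw [decide_eq_true_eq] at hpw
        apply foldl_ifmax_mem _ Prod.fst E p hp
        rw [decide_eq_true_eq]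
        have hpl : p.2.toList = (s.toList.drop k).take L.toNat := by
          rw [hpw, hslice L hL0]
        rw [hpl]
        exact List.take_prefix _ _
  · apply foldl_ifmax_le
    · exact foldl_ifmax_base _ _ _ _
    · intro p hp hpre
      rw [decide_eq_true_eq] at hpre
      have hmemlen := len_mem_lengths numbers p hp
      have hwlen : PySem.Str.len p.2 = ((p.2.toList.length : Nat) : Int) := PySem.Str.len_eq p.2
      have hfit : ((k : Nat) : Int) + PySem.Str.len p.2 ≤ ((n : Nat) : Int) := by
        have hle := hpre.length_le
        rw [List.length_drop] at hle
        omega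
      have hslicew : PySem.Str.slice s (some ((k : Nat) : Int)) (some (((k : Nat) : Int) + PySem.Str.len p.2)) = p.2 := by
        apply String.toList_inj.mp
        rw [hslice _ (by omega)]
        rw [show (PySem.Str.len p.2).toNat = p.2.toList.length by omega]
        exact (List.prefix_iff_eq_take.mp hpre).symm
      have h1 : p.1 ≤ (patDict numbers).getD (PySem.Str.slice s (some ((k : Nat) : Int)) (some (((k : Nat) : Int) + PySem.Str.len p.2))) (-1) := by
        rw [hslicew, getD_patDict_eq_ifmax]
        exact foldl_ifmax_mem _ Prod.fst E p hp (by simp) (-1)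
      refine le_trans h1 ?_
      exact foldl_ifmax_mem _ _ lengths (PySem.Str.len p.2) hmemlen (by simpa using hfit) (-1)

lemma parts_eq (s : String) (numbers : List String) :
    ((PySem.List.pyRange 0 (PySem.Str.len s + 1)).foldl (fun parts i =>
      let best := (PySem.List.sorted (PySem.Set.ofList ((patDict numbers).keys.map PySem.Str.len)) (fun x => x)).foldl (fun best L =>
        if i + L ≤ PySem.Str.len s then
          let j := (patDict numbers).getD (PySem.Str.slice s (some i) (some (i+L))) (-1)
          if best < j then j else best
        else best) (-1)
      if 0 ≤ best then parts ++ [PySem.Int.toStr best] else parts) ([] : List String))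
      = (tgt s.toList numbers).map (fun p => PySem.Int.toStr p.2) := by
  rw [PySem.Str.len_eq, show ((s.toList.length : Int) + 1) = ((s.toList.length + 1 : Nat) : Int) by push_cast; ring,
    PySem.List.pyRange_zero_natCast, List.foldl_map]
  refine (PySem.List.foldl_congr_mem _ _ (fun parts k => if 0 ≤ bestAt s.toList numbers k
      then parts ++ [PySem.Int.toStr (bestAt s.toList numbers k)] else parts) _ ?_).trans ?_
  · intro parts k hkmem
    rw [List.mem_range] at hkmem
    have hb := Bbest_eq_bestAt s numbers k (by omega)
    simp only []
    rw [hb]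
  · rw [foldl_append_if' (fun k => 0 ≤ bestAt s.toList numbers k)
      (fun k => PySem.Int.toStr (bestAt s.toList numbers k)) (List.range (s.toList.length + 1)) []]
    rw [tgt_map_toStr]
    simp

-- ===== VERDICT (by name: the statement is the Claim_ definition above) =====
theorem convertStringToNum_spec : Claim_equal_convertStringToNum := by
  intro strNums numbers _
  unfold Spec_convertStringToNum
  by_cases h : strNums = ""
  · unfold convertStringToNum convertStringToNum_alt
    rw [if_pos h]
    simp [h]
  · have hA : convertStringToNum strNums numbers
        = (PySem.List.sorted2 (findNumberMap strNums numbers).items Prod.fst Prod.snd).foldl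
            (fun r p => r ++ PySem.Int.toStr p.2) "" := by
      unfold convertStringToNum
      rw [if_pos h]
    have hB : convertStringToNum_alt strNums numbers
        = PySem.Str.join "" ((PySem.List.pyRange 0 (PySem.Str.len strNums + 1)).foldl (fun parts i =>
            let best := (PySem.List.sorted (PySem.Set.ofList ((patDict numbers).keys.map PySem.Str.len)) (fun x => x)).foldl (fun best L =>
              if i + L ≤ PySem.Str.len strNums then
                let j := (patDict numbers).getD (PySem.Str.slice strNums (some i) (some (i+L))) (-1)
                if best < j then j else best
              else best) (-1)
            if 0 ≤ best then parts ++ [PySem.Int.toStr best] else parts) ([] : List String)) := by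
      unfold convertStringToNum_alt patDict
      rw [if_neg h]
    rw [hA, hB, sorted2_items_eq_tgt, parts_eq]
    apply String.toList_inj.mp
    rw [toList_A_fold, join_nil_flatten]
    rw [List.map_map]
    rfl
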